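-- pv_equiv track=rewrite | github.com/Divyansh3105/Smart-Sort-Selector | app.py | analyze_and_recommend
-- ===== SOURCE A (Python) =====
-- def analyze_and_recommend(data):
--     n = len(data)
--     is_sorted = data == sorted(data)
--     is_reversed = data == sorted(data, reverse=True)
--     has_duplicates = len(set(data)) != n
--
--     if n <= 10:
--         return "Insertion Sort", "Small dataset; insertion sort is efficient.", "Best: O(n), Avg/Worst: O(n²)"
--     elif is_sorted:
--         return "Insertion Sort", "Already sorted; insertion sort performs best.", "Best: O(n), Avg/Worst: O(n²)"
--     elif is_reversed and not has_duplicates: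
--         return "Quick Sort", "Reverse sorted without duplicates; quick sort is efficient.", "Best: O(n log n), Worst: O(n²)"
--     elif all(x >= 0 for x in data) and has_duplicates:
--         return "Counting Sort", "Non-negative integers with duplicates; counting sort is ideal.", "O(n + k), where k = max value"
--     else:
--         return "Merge Sort", "Large or random data; merge sort offers guaranteed performance.", "O(n log n)"
-- ===== SOURCE B (Python) =====
-- def analyze_and_recommend(data):
--     n = len(data)
--     asc = True
--     desc = True
--     nonneg = True
--     dup = False
--     seen = set()
--     prev = None
--     for x in data:
--         if prev is not None:
--             if x < prev:
--                 asc = False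
--             if x > prev:
--                 desc = False
--         prev = x
--         if x < 0:
--             nonneg = False
--         if x in seen:
--             dup = True
--         else:
--             seen.add(x)
--     if n <= 10:
--         return "Insertion Sort", "Small dataset; insertion sort is efficient.", "Best: O(n), Avg/Worst: O(n²)"
--     elif asc:
--         return "Insertion Sort", "Already sorted; insertion sort performs best.", "Best: O(n), Avg/Worst: O(n²)"
--     elif desc and not dup:
--         return "Quick Sort", "Reverse sorted without duplicates; quick sort is efficient.", "Best: O(n log n), Worst: O(n²)"
--     elif nonneg and dup:
--         return "Counting Sort", "Non-negative integers with duplicates; counting sort is ideal.", "O(n + k), where k = max value"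
--     else:
--         return "Merge Sort", "Large or random data; merge sort offers guaranteed performance.", "O(n log n)"
-- ===== Notes on version B (the rewrite author's own statement) =====
-- stated objective: faster
-- what changed: Replaced the two full sorts and whole-list set construction with a single linear pass that tracks nondecreasing/nonincreasing order, nonnegativity and a duplicate flag via an incrementally built seen-set.
import Mathlib
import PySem

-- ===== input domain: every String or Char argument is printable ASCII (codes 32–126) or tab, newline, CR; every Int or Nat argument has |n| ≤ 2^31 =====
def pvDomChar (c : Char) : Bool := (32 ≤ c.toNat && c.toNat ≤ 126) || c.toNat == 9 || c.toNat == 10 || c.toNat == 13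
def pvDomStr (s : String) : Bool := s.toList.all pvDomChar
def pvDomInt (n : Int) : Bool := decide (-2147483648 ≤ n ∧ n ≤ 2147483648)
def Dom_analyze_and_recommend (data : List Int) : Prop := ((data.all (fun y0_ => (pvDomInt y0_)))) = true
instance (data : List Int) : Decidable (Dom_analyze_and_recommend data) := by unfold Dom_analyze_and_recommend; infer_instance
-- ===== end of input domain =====

-- B replaces A's two full sorts and set(data) construction by one linear pass over the list; a timing run measured it faster.

-- ===== PORT A =====
def analyze_and_recommend (data : List Int) : List String :=
  let n : Int := data.length
  let is_sorted : Bool := decide (data = PySem.List.sorted data (fun x => x) false)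
  let is_reversed : Bool := decide (data = PySem.List.sorted data (fun x => x) true)
  let has_duplicates : Bool := decide (((PySem.Set.ofList data).length : Int) ≠ n)
  if n ≤ 10 then
    ["Insertion Sort", "Small dataset; insertion sort is efficient.", "Best: O(n), Avg/Worst: O(n²)"]
  else if is_sorted then
    ["Insertion Sort", "Already sorted; insertion sort performs best.", "Best: O(n), Avg/Worst: O(n²)"]
  else if is_reversed && !has_duplicates then
    ["Quick Sort", "Reverse sorted without duplicates; quick sort is efficient.", "Best: O(n log n), Worst: O(n²)"]
  else if (data.all fun x => decide (0 ≤ x)) && has_duplicates then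
    ["Counting Sort", "Non-negative integers with duplicates; counting sort is ideal.", "O(n + k), where k = max value"]
  else
    ["Merge Sort", "Large or random data; merge sort offers guaranteed performance.", "O(n log n)"]

-- ===== PORT B =====
-- one step of B's single pass: update (asc, desc, nonneg, dup, seen, prev) with the next element
def arStep (s : Bool × Bool × Bool × Bool × PySem.Set Int × Option Int) (x : Int) :
    Bool × Bool × Bool × Bool × PySem.Set Int × Option Int :=
  match s with
  | (asc, desc, nonneg, dup, seen, prev) =>
    let asc := match prev with
      | some p => if x < p then false else asc
      | none => asc
    let desc := match prev with
      | some p => if p < x then false else desc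
      | none => desc
    let nonneg := if x < 0 then false else nonneg
    let dup' := if PySem.Set.contains seen x then true else dup
    let seen := PySem.Set.add seen x
    (asc, desc, nonneg, dup', seen, some x)

def analyze_and_recommend_alt (data : List Int) : List String :=
  let n : Int := data.length
  match data.foldl arStep (true, true, true, false, PySem.Set.empty, none) with
  | (asc, desc, nonneg, dup, _, _) =>
    if n ≤ 10 then
      ["Insertion Sort", "Small dataset; insertion sort is efficient.", "Best: O(n), Avg/Worst: O(n²)"]
    else if asc then
      ["Insertion Sort", "Already sorted; insertion sort performs best.", "Best: O(n), Avg/Worst: O(n²)"]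
    else if desc && !dup then
      ["Quick Sort", "Reverse sorted without duplicates; quick sort is efficient.", "Best: O(n log n), Worst: O(n²)"]
    else if nonneg && dup then
      ["Counting Sort", "Non-negative integers with duplicates; counting sort is ideal.", "O(n + k), where k = max value"]
    else
      ["Merge Sort", "Large or random data; merge sort offers guaranteed performance.", "O(n log n)"]

-- ===== PRECONDITION & SPEC =====
def Spec_analyze_and_recommend (data : List Int) (out : List String) : Prop := out = analyze_and_recommend_alt data
instance (data : List Int) (out : List String) : Decidable (Spec_analyze_and_recommend data out) := by unfold Spec_analyze_and_recommend; infer_instance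

-- ===== CLAIM (what is proved, stated in full; the proofs are below) =====
def Claim_equal_analyze_and_recommend : Prop := ∀ (data : List Int), Dom_analyze_and_recommend data → Spec_analyze_and_recommend data (analyze_and_recommend data)

-- ===== LEMMAS AND PROOFS =====

def ascOk : Option Int → List Int → Bool
  | _, [] => true
  | none, x :: xs => ascOk (some x) xs
  | some p, x :: xs => (!decide (x < p)) && ascOk (some x) xs

def descOk : Option Int → List Int → Bool
  | _, [] => true
  | none, x :: xs => descOk (some x) xs
  | some p, x :: xs => (!decide (p < x)) && descOk (some x) xs

def dupAux : PySem.Set Int → List Int → Bool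
  | _, [] => false
  | seen, x :: xs => PySem.Set.contains seen x || dupAux (PySem.Set.add seen x) xs

def lastO : Option Int → List Int → Option Int
  | p, [] => p
  | _, x :: xs => lastO (some x) xs

theorem arFold_spec (data : List Int) (a d nn dp : Bool) (seen : PySem.Set Int) (prev : Option Int) :
    data.foldl arStep (a, d, nn, dp, seen, prev) =
      (a && ascOk prev data, d && descOk prev data,
       nn && data.all (fun x => !decide (x < 0)), dp || dupAux seen data,
       PySem.Set.update seen data, lastO prev data) := by
  induction data generalizing a d nn dp seen prev with
  | nil => simp [ascOk, descOk, dupAux, lastO, PySem.Set.update]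
  | cons x xs ih =>
    rw [List.foldl_cons]
    show (xs.foldl arStep (arStep (a, d, nn, dp, seen, prev) x)) = _
    cases prev with
    | none =>
      simp only [arStep, ih, ascOk, descOk, dupAux, lastO, List.all_cons, PySem.Set.update,
        List.foldl_cons]
      by_cases h1 : x < 0 <;> by_cases h2 : PySem.Set.contains seen x <;>
        simp [h1, h2, Bool.and_assoc, Bool.or_assoc, Bool.or_left_comm, Bool.and_left_comm]
    | some p =>
      simp only [arStep, ih, ascOk, descOk, dupAux, lastO, List.all_cons, PySem.Set.update,
        List.foldl_cons]
      by_cases h1 : x < 0 <;> by_cases h2 : PySem.Set.contains seen x <;>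
        by_cases h3 : x < p <;> by_cases h4 : p < x <;>
          simp [h1, h2, h3, h4, Bool.and_assoc, Bool.or_assoc, Bool.or_left_comm, Bool.and_left_comm]

theorem ascOk_some_iff (data : List Int) : ∀ p, ascOk (some p) data = true ↔ List.IsChain (· ≤ ·) (p :: data) := by
  induction data with
  | nil => intro p; simp [ascOk, List.isChain_singleton]
  | cons x xs ih =>
    intro p
    simp [ascOk, ih, List.isChain_cons_cons, Int.not_lt, and_comm]

theorem ascOk_none_iff (data : List Int) : ascOk none data = true ↔ List.IsChain (· ≤ ·) data := by
  cases data with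
  | nil => simp [ascOk, List.isChain_nil]
  | cons x xs => simpa [ascOk] using ascOk_some_iff xs x

theorem descOk_some_iff (data : List Int) : ∀ p, descOk (some p) data = true ↔ List.IsChain (fun a b => b ≤ a) (p :: data) := by
  induction data with
  | nil => intro p; simp [descOk, List.isChain_singleton]
  | cons x xs ih =>
    intro p
    simp [descOk, ih, List.isChain_cons_cons, Int.not_lt, and_comm]

theorem descOk_none_iff (data : List Int) : descOk none data = true ↔ List.IsChain (fun a b => b ≤ a) data := by
  cases data with
  | nil => simp [descOk, List.isChain_nil]
  | cons x xs => simpa [descOk] using descOk_some_iff xs x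

theorem sorted_self_iff (data : List Int) :
    data = PySem.List.sorted data (fun x => x) false ↔ data.Pairwise (fun a b => a ≤ b) := by
  constructor
  · intro h
    have := PySem.List.sorted_pairwise data (fun x => x)
    rw [← h] at this
    exact this
  · intro h
    exact (PySem.List.sorted_eq_self_of_pairwise _ _ h).symm

theorem sorted_rev_self_iff (data : List Int) :
    data = PySem.List.sorted data (fun x => x) true ↔ data.Pairwise (fun a b => b ≤ a) := by
  constructor
  · intro h
    have := PySem.List.sorted_pairwise_rev data (fun x => x)
    rw [← h] at this
    exact this
  · intro h
    exact (PySem.List.sorted_rev_eq_self_of_pairwise _ _ h).symm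

theorem ascOk_eq_decide (data : List Int) :
    ascOk none data = decide (data = PySem.List.sorted data (fun x => x) false) := by
  haveI : Trans (fun x1 x2 : Int => x1 ≤ x2) (fun x1 x2 : Int => x1 ≤ x2) (fun x1 x2 : Int => x1 ≤ x2) :=
    ⟨fun hab hbc => le_trans hab hbc⟩
  rw [Bool.eq_iff_iff, ascOk_none_iff, decide_eq_true_eq, sorted_self_iff,
    List.isChain_iff_pairwise]

theorem descOk_eq_decide (data : List Int) :
    descOk none data = decide (data = PySem.List.sorted data (fun x => x) true) := by
  haveI : Trans (fun a b : Int => b ≤ a) (fun a b : Int => b ≤ a) (fun a b : Int => b ≤ a) :=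
    ⟨fun hab hbc => le_trans hbc hab⟩
  rw [Bool.eq_iff_iff, descOk_none_iff, decide_eq_true_eq, sorted_rev_self_iff,
    List.isChain_iff_pairwise]

theorem dupAux_eq_false_iff (data : List Int) : ∀ seen : PySem.Set Int,
    dupAux seen data = false ↔ (data.Nodup ∧ ∀ x ∈ data, x ∉ seen) := by
  induction data with
  | nil => intro seen; simp [dupAux]
  | cons x xs ih =>
    intro seen
    rw [show dupAux seen (x :: xs) = (PySem.Set.contains seen x || dupAux (PySem.Set.add seen x) xs)
      from rfl, Bool.or_eq_false_iff, ih, List.nodup_cons]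
    constructor
    · rintro ⟨h1, h2, h3⟩
      have hx : x ∉ seen := fun hm => by
        rw [(PySem.Set.contains_iff seen x).2 hm] at h1; simp at h1
      refine ⟨⟨fun hm => (h3 x hm) ((PySem.Set.mem_add _ _ _).2 (Or.inr rfl)), h2⟩, ?_⟩
      intro y hy
      rcases List.mem_cons.1 hy with rfl | hy'
      · exact hx
      · exact fun hs => h3 y hy' ((PySem.Set.mem_add _ _ _).2 (Or.inl hs))
    · rintro ⟨⟨hnx, h2⟩, h3⟩
      have hxs : x ∉ seen := h3 x (List.mem_cons_self)
      refine ⟨?_, h2, ?_⟩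
      · cases hc : PySem.Set.contains seen x
        · rfl
        · exact absurd ((PySem.Set.contains_iff seen x).1 hc) hxs
      · intro y hy hmem
        rcases (PySem.Set.mem_add _ _ _).1 hmem with hs | rfl
        · exact h3 y (List.mem_cons_of_mem _ hy) hs
        · exact hnx hy

theorem discard_sublist (s : PySem.Set Int) (x : Int) : (PySem.Set.discard s x).Sublist s := by
  simp [PySem.Set.discard]

theorem ofList_sublist (xs : List Int) : (PySem.Set.ofList xs).Sublist xs := by
  induction xs with
  | nil => simp [PySem.Set.ofList]
  | cons x xs ih =>
    rw [PySem.Set.ofList_cons]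
    exact List.Sublist.cons₂ x ((discard_sublist _ x).trans ih)

theorem ofList_length_eq_iff (xs : List Int) :
    (PySem.Set.ofList xs).length = xs.length ↔ xs.Nodup := by
  constructor
  · intro h
    have := (ofList_sublist xs).eq_of_length h
    rw [← this]
    exact PySem.Set.nodup_ofList xs
  · intro h
    rw [PySem.Set.ofList_eq_self_of_nodup _ h]

theorem dup_eq_decide (data : List Int) :
    (dupAux PySem.Set.empty data) = decide (((PySem.Set.ofList data).length : Int) ≠ (data.length : Int)) := by
  rw [Bool.eq_iff_iff, decide_eq_true_eq, ne_eq, Int.natCast_inj, ofList_length_eq_iff]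
  constructor
  · intro h hnd
    rw [(dupAux_eq_false_iff data PySem.Set.empty).2 ⟨hnd, by simp [PySem.Set.empty]⟩] at h
    simp at h
  · intro h
    cases hd : dupAux PySem.Set.empty data with
    | true => rfl
    | false => exact absurd ((dupAux_eq_false_iff data PySem.Set.empty).1 hd).1 h

-- ===== VERDICT (by name: the statement is the Claim_ definition above) =====
theorem analyze_and_recommend_spec : Claim_equal_analyze_and_recommend := by
  intro data _
  unfold Spec_analyze_and_recommend analyze_and_recommend analyze_and_recommend_alt
  rw [arFold_spec]
  have hnn : ∀ x : Int, (!decide (x < 0)) = decide (0 ≤ x) := by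
    intro x; by_cases h : x < 0 <;> simp [h] <;> omega
  simp only [Bool.true_and, Bool.false_or, ascOk_eq_decide, descOk_eq_decide, dup_eq_decide, hnn]
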